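-- pv_equiv track=rewrite | github.com/richt3211/practice-coding-problems | plaid/plaid-interview/test.py | recurring_list
-- ===== SOURCE A (Python) =====
-- def recurring_list(_list):
--     d = {l[0]: [] for l in _list}
--     for l in _list:
--
--         # {
--         #     "Netflix": {curr_value: 9.99, curr_time: 10, count: 0, difference: number}
--         # }
--
--         # dict holds last seen value for a description, and the count
--         # add key to dict if it doesn't exist already
--         # check the current value against the previous value, if it's there
--         # if l[0] in d
--         d[l[0]].append((l[1], l[2]))
--
--     ret = []
--     for key,value in d.items():
--         # check if all amounts are same
--         # check if all timestamps are same distance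
--         # check if there are at least 3 values
--         same_value = True
--         same_difference = True
--         count = 0
--         if len(value) < 3:
--             continue
--         curr_value = value[0][0]
--         curr_time = value[0][1]
--         difference = value[1][1] - value[0][1]
--         iter_count = 0
--         for v in value:
--             if iter_count != 0:
--                 if (v[0] != curr_value):
--                     same_value = False
--                     continue
--                 if (v[1] - curr_time) != difference:
--                     same_difference = False
--                     continue
--                 count += 1
--                 curr_value = v[0]
--                 curr_time = v[1]
--             iter_count += 1
--
--         if count >= 2 and same_value and same_difference:
--             ret.append(key)
--     return ret
-- ===== SOURCE B (Python) =====
-- def recurring_list(_list):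
--     ret = []
--     for key in dict.fromkeys(l[0] for l in _list):
--         entries = [(l[1], l[2]) for l in _list if l[0] == key]
--         if len(entries) < 3:
--             continue
--         values = {v for v, _ in entries}
--         gaps = {b[1] - a[1] for a, b in zip(entries, entries[1:])}
--         if len(values) == 1 and len(gaps) == 1:
--             ret.append(key)
--     return ret
-- ===== Notes on version B (the rewrite author's own statement) =====
-- stated objective: simpler
-- what changed: A's flag/continue/count inner loop with mutable curr_value/curr_time state is replaced by a per-key comprehension plus a set-cardinality check: a key qualifies iff its value set and its consecutive-gap set are both singletons; grouping via a pre-initialized dict plus append loop becomes dict.fromkeys over keys with a filtering comprehension per key.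
import Mathlib
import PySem

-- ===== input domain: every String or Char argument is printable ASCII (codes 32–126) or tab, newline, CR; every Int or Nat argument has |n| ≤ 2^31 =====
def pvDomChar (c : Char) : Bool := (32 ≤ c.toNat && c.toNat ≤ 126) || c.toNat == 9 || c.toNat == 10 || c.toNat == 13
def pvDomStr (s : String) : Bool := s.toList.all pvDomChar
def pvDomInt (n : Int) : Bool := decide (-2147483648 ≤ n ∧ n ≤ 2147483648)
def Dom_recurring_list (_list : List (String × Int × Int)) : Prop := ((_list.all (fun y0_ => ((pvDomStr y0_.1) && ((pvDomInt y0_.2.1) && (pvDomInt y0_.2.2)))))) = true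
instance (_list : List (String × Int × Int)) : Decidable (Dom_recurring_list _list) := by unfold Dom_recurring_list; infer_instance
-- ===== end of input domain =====

-- B replaces A's flag/continue/count inner loop by a per-group set-cardinality check over values and
-- consecutive gaps (simpler decomposition; no speed claim).

-- ===== PORT A =====
-- step of A's inner 'for v in value' loop; state = (same_value, same_difference, count, curr_value, curr_time, iter_count)
def pvStepA (difference : Int) (st : Bool × Bool × Int × Int × Int × Int) (v : Int × Int) :
    Bool × Bool × Int × Int × Int × Int :=
  if st.2.2.2.2.2 ≠ 0 then
    if v.1 ≠ st.2.2.2.1 then (false, st.2.1, st.2.2.1, st.2.2.2.1, st.2.2.2.2.1, st.2.2.2.2.2 + 1)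
    else if v.2 - st.2.2.2.2.1 ≠ difference then (st.1, false, st.2.2.1, st.2.2.2.1, st.2.2.2.2.1, st.2.2.2.2.2 + 1)
    else (st.1, st.2.1, st.2.2.1 + 1, v.1, v.2, st.2.2.2.2.2 + 1)
  else (st.1, st.2.1, st.2.2.1, st.2.2.2.1, st.2.2.2.2.1, st.2.2.2.2.2 + 1)

-- A's per-group body: 'if len(value) < 3: continue', the inner loop, then 'count >= 2 and same_value and same_difference'
def pvGroupA (value : List (Int × Int)) : Bool :=
  if value.length < 3 then false
  else
    let curr_value := (PySem.List.pyGetD value 0 (0, 0)).1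
    let curr_time := (PySem.List.pyGetD value 0 (0, 0)).2
    let difference := (PySem.List.pyGetD value 1 (0, 0)).2 - (PySem.List.pyGetD value 0 (0, 0)).2
    let st := value.foldl (pvStepA difference) (true, true, 0, curr_value, curr_time, 0)
    decide (2 ≤ st.2.2.1) && st.1 && st.2.1

-- d[l[0]].append(x): the key is always present (pre-inserted by the dict comprehension), so Python's
-- d[l[0]] never raises; it is ported exactly by Dict.modify with default [].
def recurring_list (_list : List (String × Int × Int)) : List String :=
  let d0 : PySem.Dict String (List (Int × Int)) :=
    _list.foldl (fun d l => d.insert l.1 []) PySem.Dict.empty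
  let d := _list.foldl (fun d l => d.modify l.1 [] (fun xs => xs ++ [(l.2.1, l.2.2)])) d0
  d.items.foldl (fun ret kv => if pvGroupA kv.2 then ret ++ [kv.1] else ret) []

-- ===== PORT B =====
-- the comprehension [(l[1], l[2]) for l in _list if l[0] == key]
def pvEntries (_list : List (String × Int × Int)) (key : String) : List (Int × Int) :=
  (_list.filter (fun l => l.1 == key)).map (fun l => (l.2.1, l.2.2))

-- B's per-group check: at least 3 entries, and the value set and the consecutive-gap set are both singletons
def pvGroupB (entries : List (Int × Int)) : Bool :=
  if entries.length < 3 then false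
  else
    let values := PySem.Set.ofList (entries.map (fun e => e.1))
    let gaps := PySem.Set.ofList
      ((entries.zip (PySem.List.slice entries (some 1) none)).map (fun ab => ab.2.2 - ab.1.2))
    values.length == 1 && gaps.length == 1

def recurring_list_alt (_list : List (String × Int × Int)) : List String :=
  (PySem.List.dedup (_list.map (fun l => l.1))).foldl
    (fun ret key => if pvGroupB (pvEntries _list key) then ret ++ [key] else ret) []

-- ===== PRECONDITION & SPEC =====
def Spec_recurring_list (_list : List (String × Int × Int)) (out : List String) : Prop := out = recurring_list_alt _list
instance (_list : List (String × Int × Int)) (out : List String) : Decidable (Spec_recurring_list _list out) := by unfold Spec_recurring_list; infer_instance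

-- ===== CLAIM (what is proved, stated in full; the proofs are below) =====
def Claim_equal_recurring_list : Prop := ∀ (_list : List (String × Int × Int)), Dom_recurring_list _list → Spec_recurring_list _list (recurring_list _list)

-- ===== LEMMAS AND PROOFS =====

theorem pv_keys_insert_eq_add {ν : Type} (d : PySem.Dict String ν) (k : String) (v : ν) :
    (d.insert k v).keys = PySem.Set.add d.keys k := by
  have hc : ∀ (its : List (String × ν)), (its.any (fun p => p.1 == k)) = (its.map (fun x => x.1)).contains k := by
    intro its
    induction its with
    | nil => rfl
    | cons p t ih =>
      have hb : (k == p.1) = (p.1 == k) := by by_cases h : k = p.1 <;> simp [h, Ne.symm]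
      simp [ih, hb]
  simp only [PySem.Dict.insert, PySem.Set.add, PySem.Set.contains, PySem.Dict.keys, PySem.Dict.contains, hc]
  by_cases h : (d.items.map (fun x => x.1)).contains k
  · simp only [h, if_true, List.map_map]
    refine List.map_congr_left (fun p _ => ?_)
    by_cases hp : p.1 = k
    · simp [hp]
    · simp [hp]
  · simp only [h, if_false, Bool.false_eq_true, List.map_append, List.map_cons, List.map_nil]

theorem pv_keys_foldl_insert {ν : Type} (f : PySem.Dict String ν → (String × Int × Int) → ν)
    (xs : List (String × Int × Int)) (d : PySem.Dict String ν) :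
    (xs.foldl (fun d l => d.insert l.1 (f d l)) d).keys =
      List.foldl PySem.Set.add d.keys (xs.map (fun l => l.1)) := by
  induction xs generalizing d with
  | nil => rfl
  | cons l t ih => simp [List.foldl_cons, ih, pv_keys_insert_eq_add]

theorem pv_mem_foldl_add (ks : List String) (s : PySem.Set String) (y : String)
    (h : y ∈ s ∨ y ∈ ks) : y ∈ List.foldl PySem.Set.add s ks := by
  induction ks generalizing s with
  | nil => simpa using h
  | cons x t ih =>
    refine ih (PySem.Set.add s x) ?_
    rcases h with h | h
    · exact Or.inl ((PySem.Set.mem_add s x y).2 (Or.inl h))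
    · rcases List.mem_cons.1 h with h | h
      · exact Or.inl ((PySem.Set.mem_add s x y).2 (Or.inr h))
      · exact Or.inr h

theorem pv_foldl_add_absorb (ks : List String) (s : PySem.Set String)
    (h : ∀ y ∈ ks, y ∈ s) : List.foldl PySem.Set.add s ks = s := by
  induction ks with
  | nil => rfl
  | cons x t ih =>
    have hx : PySem.Set.add s x = s := by
      simp [PySem.Set.add, PySem.Set.contains, h x (List.mem_cons_self ..)]
    rw [List.foldl_cons, hx, ih (fun y hy => h y (List.mem_cons_of_mem _ hy))]

theorem pv_foldl_add_idem (ks : List String) (s : PySem.Set String) :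
    List.foldl PySem.Set.add (List.foldl PySem.Set.add s ks) ks = List.foldl PySem.Set.add s ks :=
  pv_foldl_add_absorb ks _ (fun y hy => pv_mem_foldl_add ks s y (Or.inr hy))

theorem pv_getD_foldl_append (xs : List (String × Int × Int))
    (d : PySem.Dict String (List (Int × Int))) (k : String) :
    (xs.foldl (fun d l => d.modify l.1 [] (fun v => v ++ [(l.2.1, l.2.2)])) d).getD k [] =
      d.getD k [] ++ pvEntries xs k := by
  induction xs generalizing d with
  | nil => simp [pvEntries]
  | cons l t ih =>
    simp only [List.foldl_cons, ih, pvEntries, List.filter_cons]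
    by_cases h : l.1 = k
    · subst h
      simp [PySem.Dict.modify, PySem.Dict.getD_insert_self]
    · have hb : (l.1 == k) = false := by simp [h]
      simp [PySem.Dict.modify, hb, PySem.Dict.getD_insert_of_ne _ _ _ (Ne.symm h)]

theorem pv_getD_foldl_insert_nil (xs : List (String × Int × Int))
    (d : PySem.Dict String (List (Int × Int))) (h : ∀ k, d.getD k [] = []) (k : String) :
    (xs.foldl (fun d l => d.insert l.1 []) d).getD k [] = [] := by
  induction xs generalizing d with
  | nil => exact h k
  | cons l t ih =>
    refine ih _ (fun k' => ?_)
    by_cases hk : k' = l.1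
    · subst hk; simp [PySem.Dict.getD_insert_self]
    · simp [PySem.Dict.getD_insert_of_ne _ _ _ hk, h]

theorem pv_len_le_foldl_add {α : Type} [BEq α] (xs : List α) (s : PySem.Set α) :
    s.length ≤ (List.foldl PySem.Set.add s xs).length := by
  induction xs generalizing s with
  | nil => simp
  | cons y t ih =>
    refine le_trans ?_ (ih (PySem.Set.add s y))
    simp only [PySem.Set.add]
    split
    · exact le_rfl
    · simp only [List.length_append, List.length_cons, List.length_nil]
      omega

-- singleton criterion for a Python set built from a nonempty list
theorem pv_set_singleton (x : Int) (xs : List Int) :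
    ((PySem.Set.ofList (x :: xs)).length == 1) = xs.all (fun y => y == x) := by
  have base : ∀ (t : List Int) (z : Int), ((List.foldl PySem.Set.add [z] t).length == 1) = t.all (fun y => y == z) := by
    intro t
    induction t with
    | nil => intro z; rfl
    | cons y t ih =>
      intro z
      by_cases h : y = z
      · subst h
        have ha : PySem.Set.add [y] y = [y] := by simp [PySem.Set.add, PySem.Set.contains]
        rw [List.foldl_cons, ha, List.all_cons]
        simp [ih y]
      · have ha : PySem.Set.add [z] y = [z, y] := by simp [PySem.Set.add, PySem.Set.contains, h]
        rw [List.foldl_cons, ha, List.all_cons]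
        have h2 : 2 ≤ (List.foldl PySem.Set.add [z, y] t).length := pv_len_le_foldl_add t [z, y]
        have h3 : ((List.foldl PySem.Set.add [z, y] t).length == 1) = false := by
          simp only [beq_eq_false_iff_ne]; omega
        simp [h3, h]
  have h0 : PySem.Set.ofList (x :: xs) = List.foldl PySem.Set.add [x] xs := rfl
  rw [h0]; exact base xs x

-- the success chain A's inner loop tests
def pvChain (difference : Int) (cv ct : Int) : List (Int × Int) → Bool
  | [] => true
  | v :: t => (v.1 == cv) && (v.2 - ct == difference) && pvChain difference v.1 v.2 t

theorem pv_stepA_sv_false (difference : Int) (rest : List (Int × Int))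
    (sd : Bool) (c cv ct ic : Int) :
    (rest.foldl (pvStepA difference) (false, sd, c, cv, ct, ic)).1 = false := by
  induction rest generalizing sd c cv ct ic with
  | nil => rfl
  | cons v t ih => simp only [List.foldl_cons, pvStepA]; split_ifs <;> exact ih ..

theorem pv_stepA_sd_false (difference : Int) (rest : List (Int × Int))
    (sv : Bool) (c cv ct ic : Int) :
    (rest.foldl (pvStepA difference) (sv, false, c, cv, ct, ic)).2.1 = false := by
  induction rest generalizing sv c cv ct ic with
  | nil => rfl
  | cons v t ih => simp only [List.foldl_cons, pvStepA]; split_ifs <;> exact ih ..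

theorem pv_loopA (difference : Int) (rest : List (Int × Int)) (c cv ct ic : Int) (h : 0 < ic) :
    (((rest.foldl (pvStepA difference) (true, true, c, cv, ct, ic)).1 &&
      (rest.foldl (pvStepA difference) (true, true, c, cv, ct, ic)).2.1) = pvChain difference cv ct rest) ∧
    (pvChain difference cv ct rest = true →
      (rest.foldl (pvStepA difference) (true, true, c, cv, ct, ic)).2.2.1 = c + rest.length) := by
  induction rest generalizing c cv ct ic with
  | nil => simp [pvChain]
  | cons v t ih =>
    have hne : ic ≠ 0 := by omega
    by_cases h1 : v.1 = cv
    · by_cases h2 : v.2 - ct = difference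
      · have hs : pvStepA difference (true, true, c, cv, ct, ic) v = (true, true, c + 1, v.1, v.2, ic + 1) := by
          simp [pvStepA, hne, h1, h2]
        rw [List.foldl_cons, hs]
        rcases ih (c + 1) v.1 v.2 (ic + 1) (by omega) with ⟨e1, e2⟩
        constructor
        · rw [e1]; simp [pvChain, h1, h2]
        · intro hc
          have hct : pvChain difference v.1 v.2 t = true := by
            have hc' : (((v.1 == cv) && (v.2 - ct == difference)) && pvChain difference v.1 v.2 t) = true := hc
            exact (Bool.and_eq_true_iff.1 hc').2
          rw [e2 hct]; simp [List.length_cons]; omega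
      · have hs : pvStepA difference (true, true, c, cv, ct, ic) v = (true, false, c, cv, ct, ic + 1) := by
          simp [pvStepA, hne, h1, h2]
        rw [List.foldl_cons, hs]
        constructor
        · rw [pv_stepA_sd_false]
          simp [pvChain, h2]
        · intro hc
          simp [pvChain, h2] at hc
    · have hs : pvStepA difference (true, true, c, cv, ct, ic) v = (false, true, c, cv, ct, ic + 1) := by
        simp [pvStepA, hne, h1]
      rw [List.foldl_cons, hs]
      constructor
      · rw [pv_stepA_sv_false]
        simp [pvChain, h1]
      · intro hc
        simp [pvChain, h1] at hc

theorem pv_chain_eq (difference : Int) (rest : List (Int × Int)) (p : Int × Int) :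
    pvChain difference p.1 p.2 rest =
      (rest.all (fun v => v.1 == p.1) &&
       (((p :: rest).zip rest).map (fun ab => ab.2.2 - ab.1.2)).all (fun g => g == difference)) := by
  induction rest generalizing p with
  | nil => simp [pvChain]
  | cons v t ih =>
    have hv : pvChain difference p.1 p.2 (v :: t) =
        (((v.1 == p.1) && (v.2 - p.2 == difference)) && pvChain difference v.1 v.2 t) := rfl
    rw [hv, ih v, List.zip_cons_cons, List.map_cons, List.all_cons, List.all_cons]
    by_cases h1 : v.1 = p.1
    · rw [h1]
      cases t.all (fun w => w.1 == p.1) <;> cases (v.2 - p.2 == difference) <;>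
        cases ((((v :: t).zip t).map (fun ab => ab.2.2 - ab.1.2)).all (fun g => g == difference)) <;> simp
    · have hb : (v.1 == p.1) = false := by simp [h1]
      rw [hb]
      simp

theorem pv_group_eq (e : List (Int × Int)) : pvGroupA e = pvGroupB e := by
  match e with
  | [] => rfl
  | [a] => rfl
  | [a, b] => rfl
  | a :: b :: c :: r =>
    have hlen : ¬ ((a :: b :: c :: r).length < 3) := by simp
    have g0 : PySem.List.pyGetD (a :: b :: c :: r) (0 : Int) (0, 0) = a := by simp [pysem]
    have g1 : PySem.List.pyGetD (a :: b :: c :: r) (1 : Int) (0, 0) = b := by simp [pysem]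
    simp only [pvGroupA, pvGroupB, g0, g1, if_neg hlen]
    have hstep0 : pvStepA (b.2 - a.2) (true, true, 0, a.1, a.2, 0) a = (true, true, 0, a.1, a.2, 1) := by
      simp [pvStepA]
    rw [List.foldl_cons, hstep0]
    rcases pv_loopA (b.2 - a.2) (b :: c :: r) 0 a.1 a.2 1 (by omega) with ⟨e1, e2⟩
    -- B's slice is the tail
    have hsl : PySem.List.slice (a :: b :: c :: r) (some 1) none = b :: c :: r := by
      simp [PySem.List.slice_from]
    rw [hsl]
    -- set-singleton criteria
    have hvals : ((PySem.Set.ofList ((a :: b :: c :: r).map (fun e => e.1))).length == 1) =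
        ((b :: c :: r).all (fun v => v.1 == a.1)) := by
      rw [List.map_cons, pv_set_singleton, List.all_map]
      rfl
    have hgaps : ((PySem.Set.ofList (((a :: b :: c :: r).zip (b :: c :: r)).map (fun ab => ab.2.2 - ab.1.2))).length == 1) =
        ((((b :: c :: r).zip (c :: r)).map (fun ab => ab.2.2 - ab.1.2)).all (fun g => g == b.2 - a.2)) := by
      rw [List.zip_cons_cons, List.map_cons, pv_set_singleton]
    rw [hvals, hgaps]
    -- the chain split into B's two conditions
    have hchain : pvChain (b.2 - a.2) a.1 a.2 (b :: c :: r) =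
        (((b :: c :: r).all (fun v => v.1 == a.1)) &&
         (((b :: c :: r).zip (c :: r)).map (fun ab => ab.2.2 - ab.1.2)).all (fun g => g == b.2 - a.2)) := by
      have h := pv_chain_eq (b.2 - a.2) (b :: c :: r) a
      rw [List.zip_cons_cons, List.map_cons] at h
      have hg : ((a, b).2.2 - (a, b).1.2 : Int) = b.2 - a.2 := rfl
      rw [hg, List.all_cons] at h
      simpa using h
    cases hc : pvChain (b.2 - a.2) a.1 a.2 (b :: c :: r) with
    | true =>
      rw [hc] at e1 hchain
      rcases Bool.and_eq_true_iff.1 e1 with ⟨hs1, hs2⟩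
      have hcnt := e2 hc
      rw [hs1, hs2, hcnt, ← hchain]
      simp
      all_goals omega
    | false =>
      rw [hc] at e1 hchain
      rw [← hchain]
      rcases Bool.and_eq_false_iff.1 e1 with h | h <;> rw [h] <;> simp

-- ===== VERDICT (by name: the statement is the Claim_ definition above) =====
theorem recurring_list_spec : Claim_equal_recurring_list := by
  intro xs _
  unfold Spec_recurring_list
  show List.foldl (fun ret kv => if pvGroupA kv.2 then ret ++ [kv.1] else ret) []
      (List.foldl (fun d l => PySem.Dict.modify d l.1 [] (fun v => v ++ [(l.2.1, l.2.2)]))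
        (List.foldl (fun d l => PySem.Dict.insert d l.1 []) PySem.Dict.empty xs) xs).items
    = List.foldl (fun ret key => if pvGroupB (pvEntries xs key) then ret ++ [key] else ret) []
        (PySem.List.dedup (xs.map (fun l => l.1)))
  have hmod : (fun (d : PySem.Dict String (List (Int × Int))) (l : String × Int × Int) =>
      d.modify l.1 [] (fun v => v ++ [(l.2.1, l.2.2)])) =
      (fun d l => d.insert l.1 (d.getD l.1 [] ++ [(l.2.1, l.2.2)])) := rfl
  set d0 := xs.foldl (fun d l => d.insert l.1 ([] : List (Int × Int))) PySem.Dict.empty with hd0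
  set d := xs.foldl (fun d l => d.modify l.1 [] (fun v => v ++ [(l.2.1, l.2.2)])) d0 with hd
  have hk0 : d0.keys = List.foldl PySem.Set.add [] (xs.map (fun l => l.1)) := by
    rw [hd0]; exact pv_keys_foldl_insert (fun _ _ => []) xs PySem.Dict.empty
  have hkd : d.keys = List.foldl PySem.Set.add [] (xs.map (fun l => l.1)) := by
    rw [hd, hmod, pv_keys_foldl_insert (fun d l => d.getD l.1 [] ++ [(l.2.1, l.2.2)]) xs d0, hk0]
    exact pv_foldl_add_idem _ _
  have hkeys : d.keys = PySem.List.dedup (xs.map (fun l => l.1)) := hkd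
  have hnd : d.keys.Nodup := by
    rw [hkeys]; exact PySem.List.nodup_dedup _
  have hget : ∀ k, d.getD k [] = pvEntries xs k := by
    intro k
    rw [hd, pv_getD_foldl_append, pv_getD_foldl_insert_nil xs PySem.Dict.empty (fun _ => rfl)]
    rfl
  have hitems : d.items = d.keys.map (fun k => (k, pvEntries xs k)) := by
    rw [PySem.Dict.items_eq_map_keys d hnd []]
    exact List.map_congr_left (fun k _ => by rw [hget k])
  rw [hitems, List.foldl_map, hkeys]
  simp only [pv_group_eq]
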